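-- pv_equiv track=rewrite | github.com/Paulware/piPair | images/mtg/ManaCost.py | removeDouble
-- ===== SOURCE A (Python) =====
-- def removeDouble (pool, color, number):
--    startPool = pool.copy()
--    success = True
--    colors = {'grn':'green','red':'red','blu':'blue','blk':'black','wht':'white'}
--    print ( 'Take out ' + str(number) + ' of ' + color + ' from: ' + str(pool))
--    for i in range(number):
--       found = False
--       for colorIndex in colors:
--          if color.find (colorIndex) > -1:
--             lookupColor = colors[colorIndex]
--             if pool[lookupColor] > 0:
--                pool[lookupColor] = pool[lookupColor] - 1
--                found = True
--                break
--       if not found: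
--          print ( 'removeDouble could not find ' + color + ' in ' + str(pool) )
--          success = False
--          break
--
--    if not success:
--       pool = startPool.copy()
--    print ( 'pool after removeDouble: ' + str (pool) )
--    return (success,pool)
-- ===== SOURCE B (Python) =====
-- def removeDouble(pool, color, number):
--     colors = {'grn': 'green', 'red': 'red', 'blu': 'blue', 'blk': 'black', 'wht': 'white'}
--     need = max(number, 0)
--     result = dict(pool)
--     for key, name in colors.items():
--         if need == 0:
--             break
--         if key in color:
--             take = min(need, max(result[name], 0))
--             result[name] -= take
--             need -= take
--     if need == 0:
--         return (True, result)
--     return (False, dict(pool))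
-- ===== Notes on version B (the rewrite author's own statement) =====
-- stated objective: faster
-- what changed: A removes one unit per outer-loop iteration, rescanning the five colour keys number times; B does a single greedy pass over the five colour keys, subtracting min(need, available) from each matched colour at once.
import Mathlib
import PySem

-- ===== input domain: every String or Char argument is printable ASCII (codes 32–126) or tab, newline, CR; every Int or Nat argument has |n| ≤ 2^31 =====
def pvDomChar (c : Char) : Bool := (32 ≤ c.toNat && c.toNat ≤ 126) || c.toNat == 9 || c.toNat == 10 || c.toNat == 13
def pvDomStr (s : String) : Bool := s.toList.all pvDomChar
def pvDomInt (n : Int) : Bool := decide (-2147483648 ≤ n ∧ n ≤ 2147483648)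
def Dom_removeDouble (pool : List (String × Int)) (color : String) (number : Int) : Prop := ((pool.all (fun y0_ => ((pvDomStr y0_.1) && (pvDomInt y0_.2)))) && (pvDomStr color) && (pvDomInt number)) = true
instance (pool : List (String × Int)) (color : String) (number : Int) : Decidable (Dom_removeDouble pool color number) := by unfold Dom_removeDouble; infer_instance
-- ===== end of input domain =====

-- B replaces A's per-unit outer loop (O(number) scans) by one greedy pass over the five colour keys,
-- subtracting min(need, available) per colour. Return-value equivalence only: Python A also mutates the
-- caller's pool dict in place and prints; B does neither.

-- ===== PORT A =====
-- the colors dict literal of A, as its (key, value) items in insertion order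
def pvColors : List (String × String) := [("grn","green"),("red","red"),("blu","blue"),("blk","black"),("wht","white")]

-- A's inner "for colorIndex in colors" scan: some d' = found (break after decrement), none = not found.
-- Python's pool[lookupColor] raises KeyError when the key is absent; totalized with getD 0 — Pre_ excludes
-- exactly the inputs where that read is reached on an absent key.
def pvInnerA (d : PySem.Dict String Int) (color : String) : List (String × String) → Option (PySem.Dict String Int)
  | [] => none
  | (ci, lc) :: rest =>
      if PySem.Str.find color ci > -1 then
        if d.getD lc 0 > 0 then some (d.insert lc (d.getD lc 0 - 1))
        else pvInnerA d color rest
      else pvInnerA d color rest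

-- A's outer "for i in range(number)" loop; false = early break with success = False
def pvLoopA (color : String) (cs : List (String × String)) : Nat → PySem.Dict String Int → Bool × PySem.Dict String Int
  | 0, d => (true, d)
  | n+1, d =>
      match pvInnerA d color cs with
      | some d' => pvLoopA color cs n d'
      | none => (false, d)

def removeDouble (pool : List (String × Int)) (color : String) (number : Int) : Bool × (List (String × Int)) :=
  let startPool := PySem.Dict.mk pool
  let res := pvLoopA color pvColors number.toNat startPool
  let finalPool := if res.1 then res.2 else startPool
  (res.1, finalPool.items)

-- ===== PORT B =====
-- one greedy step per colour key; the st.1 == 0 test is B's "if need == 0: break".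
-- Source B's result[name] -= take raises KeyError on an absent name; totalized with getD 0 (Pre_ excludes those inputs).
def pvStepB (color : String) (st : Int × PySem.Dict String Int) (p : String × String) : Int × PySem.Dict String Int :=
  if st.1 == 0 then st
  else if PySem.Str.isIn p.1 color then
    let take := min st.1 (max (st.2.getD p.2 0) 0)
    (st.1 - take, st.2.insert p.2 (st.2.getD p.2 0 - take))
  else st

def removeDouble_alt (pool : List (String × Int)) (color : String) (number : Int) : Bool × (List (String × Int)) :=
  let start := PySem.Dict.mk pool
  let r := pvColors.foldl (pvStepB color) (max number 0, start)
  if r.1 == 0 then (true, r.2.items) else (false, start.items)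

-- ===== PRECONDITION & SPEC =====
-- the colour names of the keys that occur in `color`, in scan order
def pvMatched (color : String) (cs : List (String × String)) : List String :=
  (cs.filter (fun p => PySem.Str.find color p.1 > -1)).map Prod.snd

def pvAvail (d : PySem.Dict String Int) (ls : List String) : Int :=
  (ls.map (fun l => max (d.getD l 0) 0)).sum

-- Pre_ excludes (a) association lists that repeat a key — a Python dict argument cannot — and (b) exactly
-- the inputs on which Python A raises KeyError: a matched colour name absent from pool that the scan reaches
-- (i.e. number exceeds the units available under the matched names preceding the first absent one).
def Pre_removeDouble (pool : List (String × Int)) (color : String) (number : Int) : Prop :=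
  (pool.map Prod.fst).Nodup ∧
  ((∀ l ∈ pvMatched color pvColors, (PySem.Dict.mk pool).contains l = true) ∨
    number ≤ pvAvail (PySem.Dict.mk pool)
      ((pvMatched color pvColors).takeWhile (fun l => (PySem.Dict.mk pool).contains l)))
instance (pool : List (String × Int)) (color : String) (number : Int) : Decidable (Pre_removeDouble pool color number) := by unfold Pre_removeDouble; infer_instance

def pvWitness_removeDouble : (List (String × Int)) × String × Int := ([("green", 2), ("red", 1)], "grn", 1)

def Spec_removeDouble (pool : List (String × Int)) (color : String) (number : Int) (out : Bool × (List (String × Int))) : Prop := out = removeDouble_alt pool color number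
instance (pool : List (String × Int)) (color : String) (number : Int) (out : Bool × (List (String × Int))) : Decidable (Spec_removeDouble pool color number out) := by unfold Spec_removeDouble; infer_instance

-- ===== CLAIM (what is proved, stated in full; the proofs are below) =====
def Claim_equal_removeDouble : Prop := ∀ (pool : List (String × Int)) (color : String) (number : Int), Dom_removeDouble pool color number → Pre_removeDouble pool color number → Spec_removeDouble pool color number (removeDouble pool color number)

-- ===== LEMMAS AND PROOFS =====

theorem pvFoldl_stepB_zero (color : String) (cs : List (String × String)) (d : PySem.Dict String Int) :
    cs.foldl (pvStepB color) ((0 : Int), d) = ((0 : Int), d) := by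
  induction cs with
  | nil => rfl
  | cons p rest ih => simpa [pvStepB] using ih

theorem pvInsert_getD_self (d : PySem.Dict String Int) (k : String) (h : d.keys.Nodup)
    (hc : d.contains k = true) : d.insert k (d.getD k 0) = d := by
  obtain ⟨v, hv⟩ : ∃ v, d.get? k = some v := by
    cases hg : d.get? k with
    | none => rw [PySem.Dict.get?_eq_none_iff_contains] at hg; simp [hg] at hc
    | some v => exact ⟨v, rfl⟩
  have hgd : d.getD k 0 = v := PySem.Dict.getD_of_get?_eq_some d 0 hv
  apply PySem.Dict.ext
  rw [PySem.Dict.items_insert_of_contains d _ hc]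
  refine (List.map_congr_left ?_).trans (List.map_id _)
  rintro ⟨p1, p2⟩ hp
  by_cases hpk : (p1 == k) = true
  · have hk : p1 = k := by simpa using hpk
    subst hk
    have h2 : d.get? p1 = some p2 := PySem.Dict.get?_of_mem_items d hp h
    rw [hv] at h2
    simp [hgd, Option.some_inj.mp h2]
  · simp [hpk]

theorem pvInnerA_some (d : PySem.Dict String Int) (color : String) (cs : List (String × String))
    (d' : PySem.Dict String Int) (h : pvInnerA d color cs = some d') :
    ∃ p ∈ cs, d' = d.insert p.2 (d.getD p.2 0 - 1) := by
  induction cs with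
  | nil => simp [pvInnerA] at h
  | cons p rest ih =>
    obtain ⟨ci, lc⟩ := p
    unfold pvInnerA at h
    split at h
    · split at h
      · exact ⟨(ci, lc), by simp, by simpa using h.symm⟩
      · obtain ⟨q, hq, he⟩ := ih h; exact ⟨q, by simp [hq], he⟩
    · obtain ⟨q, hq, he⟩ := ih h; exact ⟨q, by simp [hq], he⟩

theorem pvLoopA_congr (color : String) (cs cs' : List (String × String))
    (h : ∀ d, pvInnerA d color cs = pvInnerA d color cs') :
    ∀ n d, pvLoopA color cs n d = pvLoopA color cs' n d := by
  intro n
  induction n with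
  | zero => intro d; rfl
  | succ n ih =>
    intro d
    rw [pvLoopA, pvLoopA, h d]
    cases pvInnerA d color cs' with
    | none => rfl
    | some d' => exact ih d'

theorem pvLoopA_skip (color ci : String) (lc : String) (rest : List (String × String))
    (hlc : lc ∉ rest.map Prod.snd) :
    ∀ n d, d.getD lc 0 ≤ 0 → pvLoopA color ((ci, lc) :: rest) n d = pvLoopA color rest n d := by
  intro n
  induction n with
  | zero => intro d _; rfl
  | succ n ih =>
    intro d hd
    have hinner : pvInnerA d color ((ci, lc) :: rest) = pvInnerA d color rest := by
      conv_lhs => rw [pvInnerA]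
      split
      · rw [if_neg (by omega)]
      · rfl
    rw [pvLoopA, pvLoopA, hinner]
    cases he : pvInnerA d color rest with
    | none => rfl
    | some d' =>
      obtain ⟨q, hq, rfl⟩ := pvInnerA_some d color rest d' he
      have hne : q.2 ≠ lc := fun habs => hlc (habs ▸ List.mem_map_of_mem hq)
      exact ih _ (by rw [PySem.Dict.getD_insert_of_ne d _ _ (Ne.symm hne)]; exact hd)

theorem pvAvail_nonneg (d : PySem.Dict String Int) (ls : List String) : 0 ≤ pvAvail d ls := by
  apply List.sum_nonneg
  intro x hx
  obtain ⟨l, _, rfl⟩ := List.mem_map.mp hx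
  exact le_max_right _ _

theorem pvMatched_subset (color : String) (cs : List (String × String)) :
    ∀ l ∈ pvMatched color cs, l ∈ cs.map Prod.snd := by
  intro l hl
  obtain ⟨p, hp, rfl⟩ := List.mem_map.mp hl
  exact List.mem_map_of_mem (List.mem_of_mem_filter hp)

theorem pvFindGo_lb (sub s : List Char) : ∀ k : Nat, -1 ≤ PySem.Chars.find.go sub s k := by
  induction s with
  | nil =>
    intro k; unfold PySem.Chars.find.go; split <;> omega
  | cons h t ih =>
    intro k; unfold PySem.Chars.find.go; split
    · omega
    · exact ih (k+1)

theorem pvFind_pos_iff (s sub : String) : (PySem.Str.find s sub > -1) ↔ PySem.Str.isIn sub s = true := by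
  rw [PySem.Str.isIn_iff_infix]
  constructor
  · intro h
    by_contra hni
    have := (PySem.Str.find_eq_neg_one_iff s sub).mpr hni
    omega
  · intro h
    have h2 : ¬ PySem.Str.find s sub = -1 := fun he => ((PySem.Str.find_eq_neg_one_iff s sub).mp he) h
    have h3 : -1 ≤ PySem.Str.find s sub := pvFindGo_lb _ _ 0
    omega

theorem pvTakeWhile_congr (p q : String → Bool) (ls : List String) (h : ∀ x ∈ ls, p x = q x) :
    ls.takeWhile p = ls.takeWhile q := by
  induction ls with
  | nil => rfl
  | cons a l ih =>
    rw [List.takeWhile_cons, List.takeWhile_cons, h a (List.mem_cons_self),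
      ih (fun x hx => h x (List.mem_cons_of_mem _ hx))]

theorem pvAvail_cons (d : PySem.Dict String Int) (l : String) (ls : List String) :
    pvAvail d (l :: ls) = max (d.getD l 0) 0 + pvAvail d ls := by
  simp [pvAvail]

theorem pvAvail_congr (d d' : PySem.Dict String Int) (ls : List String)
    (h : ∀ l ∈ ls, d'.getD l 0 = d.getD l 0) : pvAvail d' ls = pvAvail d ls := by
  unfold pvAvail
  rw [List.map_congr_left (fun l hl => by rw [h l hl])]

theorem pvMain (color : String) : ∀ (cs : List (String × String)), (cs.map Prod.snd).Nodup →
    ∀ (n : Nat) (d : PySem.Dict String Int), d.keys.Nodup →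
      ((∀ l ∈ pvMatched color cs, d.contains l = true) ∨
        (n : Int) ≤ pvAvail d ((pvMatched color cs).takeWhile (fun l => d.contains l))) →
      (pvLoopA color cs n d).1 = ((cs.foldl (pvStepB color) ((n : Int), d)).1 == 0)
      ∧ ((cs.foldl (pvStepB color) ((n : Int), d)).1 = 0 →
          pvLoopA color cs n d = (true, (cs.foldl (pvStepB color) ((n : Int), d)).2)) := by
  intro cs
  induction cs with
  | nil =>
    intro _ n d _ _
    cases n with
    | zero => exact ⟨by simp [pvLoopA], fun _ => by simp [pvLoopA]⟩
    | succ n =>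
      constructor
      · show (pvLoopA color [] (n+1) d).1 = ((((n+1 : Nat) : Int), d).1 == 0)
        rw [pvLoopA]
        show (false : Bool) = _
        simp
        omega
      · intro h
        simp only [List.foldl_nil] at h
        omega
  | cons hd rest ih =>
    obtain ⟨ci, lc⟩ := hd
    intro hv
    rw [List.map_cons, List.nodup_cons] at hv
    obtain ⟨hlc, hrest⟩ := hv
    by_cases hm : PySem.Str.find color ci > -1
    · -- matched head
      have hisin : PySem.Str.isIn ci color = true := (pvFind_pos_iff color ci).mp hm
      have hm' : (-1 : Int) < PySem.Chars.find color.toList ci.toList := hm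
      have hmatch : pvMatched color ((ci, lc) :: rest) = lc :: pvMatched color rest := by
        simp [pvMatched, hm']
      have hmem_rest : ∀ l ∈ pvMatched color rest, l ≠ lc :=
        fun l hl he => hlc (he ▸ pvMatched_subset color rest l hl)
      intro n
      induction n with
      | zero =>
        intro d _ _
        rw [Nat.cast_zero, pvFoldl_stepB_zero]
        exact ⟨by simp [pvLoopA], fun _ => by simp [pvLoopA]⟩
      | succ n ihn =>
        intro d hk hpre
        have hc : d.contains lc = true := by
          rcases hpre with h1 | h2
          · exact h1 lc (by rw [hmatch]; exact List.mem_cons_self)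
          · by_contra hnc
            have hnc' : d.contains lc = false := by simpa using hnc
            rw [hmatch, List.takeWhile_cons_of_neg (by simp [hnc'])] at h2
            simp [pvAvail] at h2
            omega
        by_cases hpos : 0 < d.getD lc 0
        · -- positive head count: one unit comes off lc, recurse on n
          have hinner : pvInnerA d color ((ci, lc) :: rest) = some (d.insert lc (d.getD lc 0 - 1)) := by
            conv_lhs => rw [pvInnerA]
            rw [if_pos hm, if_pos hpos]
          have hloop : pvLoopA color ((ci, lc) :: rest) (n+1) d
              = pvLoopA color ((ci, lc) :: rest) n (d.insert lc (d.getD lc 0 - 1)) := by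
            rw [pvLoopA, hinner]
          have h0 : ¬ ((n+1 : Nat) : Int) = 0 := by omega
          have hsteps : pvStepB color (((n+1 : Nat) : Int), d) (ci, lc)
              = pvStepB color ((n : Int), d.insert lc (d.getD lc 0 - 1)) (ci, lc) := by
            by_cases hn0 : n = 0
            · subst hn0
              have hmin : min ((0+1 : Nat) : Int) (max (d.getD lc 0) 0) = 1 := by omega
              simp only [pvStepB, beq_iff_eq, hisin, if_true, if_neg h0, Nat.cast_zero, hmin]
              rw [Prod.mk.injEq]
              constructor
              · omega
              · rfl
            · have h0' : ¬ ((n : Nat) : Int) = 0 := by omega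
              simp only [pvStepB, beq_iff_eq, hisin, if_true, if_neg h0, if_neg h0',
                PySem.Dict.getD_insert_self, PySem.Dict.insert_insert_self]
              rw [Prod.mk.injEq]
              constructor
              · omega
              · congr 1
                omega
          have hfold : ((ci, lc) :: rest).foldl (pvStepB color) (((n+1 : Nat) : Int), d)
              = ((ci, lc) :: rest).foldl (pvStepB color) ((n : Int), d.insert lc (d.getD lc 0 - 1)) := by
            rw [List.foldl_cons, List.foldl_cons, hsteps]
          have hk1 : (d.insert lc (d.getD lc 0 - 1)).keys.Nodup := PySem.Dict.nodup_keys_insert _ _ _ hk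
          have hcont1 : ∀ l ∈ pvMatched color rest,
              (d.insert lc (d.getD lc 0 - 1)).contains l = d.contains l := by
            intro l hl
            rw [PySem.Dict.contains_insert]
            simp [hmem_rest l hl]
          have hpre1 : (∀ l ∈ pvMatched color ((ci, lc) :: rest),
                (d.insert lc (d.getD lc 0 - 1)).contains l = true) ∨
              (n : Int) ≤ pvAvail (d.insert lc (d.getD lc 0 - 1))
                ((pvMatched color ((ci, lc) :: rest)).takeWhile
                  (fun l => (d.insert lc (d.getD lc 0 - 1)).contains l)) := by
            rcases hpre with h1 | h2
            · left; intro l hl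
              rw [PySem.Dict.contains_insert]
              simp [h1 l hl]
            · right
              rw [hmatch] at h2 ⊢
              rw [List.takeWhile_cons_of_pos (by simpa using hc)] at h2
              rw [List.takeWhile_cons_of_pos (by simp)]
              rw [pvAvail_cons] at h2
              rw [pvAvail_cons, PySem.Dict.getD_insert_self]
              have htw : (pvMatched color rest).takeWhile
                    (fun l => (d.insert lc (d.getD lc 0 - 1)).contains l)
                  = (pvMatched color rest).takeWhile (fun l => d.contains l) :=
                pvTakeWhile_congr _ _ _ (fun l hl => hcont1 l hl)
              rw [htw]
              have hav : pvAvail (d.insert lc (d.getD lc 0 - 1))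
                    ((pvMatched color rest).takeWhile (fun l => d.contains l))
                  = pvAvail d ((pvMatched color rest).takeWhile (fun l => d.contains l)) := by
                apply pvAvail_congr
                intro l hl
                exact PySem.Dict.getD_insert_of_ne d _ _
                  (hmem_rest l ((List.takeWhile_sublist _).subset hl))
              rw [hav]
              omega
          rw [hloop, hfold]
          exact ihn (d.insert lc (d.getD lc 0 - 1)) hk1 hpre1
        · -- head count ≤ 0: head is dead on both sides
          have hle : d.getD lc 0 ≤ 0 := by omega
          have hloop := pvLoopA_skip color ci lc rest hlc (n+1) d hle
          have hstep : pvStepB color (((n+1 : Nat) : Int), d) (ci, lc) = (((n+1 : Nat) : Int), d) := by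
            have h0 : ¬ ((n+1 : Nat) : Int) = 0 := by omega
            have hmin : min ((n+1 : Nat) : Int) (max (d.getD lc 0) 0) = 0 := by omega
            simp only [pvStepB, beq_iff_eq, if_neg h0, hisin, if_pos, hmin]
            rw [sub_zero, sub_zero, pvInsert_getD_self d lc hk hc]
          have hfold : ((ci, lc) :: rest).foldl (pvStepB color) (((n+1 : Nat) : Int), d)
              = rest.foldl (pvStepB color) (((n+1 : Nat) : Int), d) := by
            rw [List.foldl_cons, hstep]
          have hpre' : (∀ l ∈ pvMatched color rest, d.contains l = true) ∨
              ((n+1 : Nat) : Int) ≤ pvAvail d ((pvMatched color rest).takeWhile (fun l => d.contains l)) := by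
            rcases hpre with h1 | h2
            · left; intro l hl; exact h1 l (by rw [hmatch]; exact List.mem_cons_of_mem _ hl)
            · right
              rw [hmatch, List.takeWhile_cons_of_pos (by simpa using hc), pvAvail_cons] at h2
              omega
          rw [hloop, hfold]
          exact ih hrest (n+1) d hk hpre'
    · -- head key does not occur in color: head is ignored on both sides
      have hisin : PySem.Str.isIn ci color = false := by
        by_contra h
        rw [Bool.not_eq_false] at h
        exact hm ((pvFind_pos_iff color ci).mpr h)
      have hm' : ¬ ((-1 : Int) < PySem.Chars.find color.toList ci.toList) := hm
      have hmatch : pvMatched color ((ci, lc) :: rest) = pvMatched color rest := by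
        simp [pvMatched, hm']
      intro n d hk hpre
      have hinner : ∀ d', pvInnerA d' color ((ci, lc) :: rest) = pvInnerA d' color rest := by
        intro d'
        conv_lhs => rw [pvInnerA]
        rw [if_neg hm]
      have hloop := pvLoopA_congr color ((ci, lc) :: rest) rest hinner n d
      have hisin' : PySem.Chars.isIn ci.toList color.toList = false := hisin
      have hstep : pvStepB color ((n : Int), d) (ci, lc) = ((n : Int), d) := by
        simp [pvStepB, hisin']
      have hfold : ((ci, lc) :: rest).foldl (pvStepB color) ((n : Int), d)
          = rest.foldl (pvStepB color) ((n : Int), d) := by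
        rw [List.foldl_cons, hstep]
      rw [hloop, hfold]
      exact ih hrest n d hk (by rwa [hmatch] at hpre)

-- ===== VERDICT (by name: the statement is the Claim_ definition above) =====
theorem removeDouble_spec : Claim_equal_removeDouble := by
  intro pool color number _hdom hpre
  obtain ⟨hnodup, hpre2⟩ := hpre
  show removeDouble pool color number = removeDouble_alt pool color number
  simp only [removeDouble, removeDouble_alt]
  have hkeys : (PySem.Dict.mk pool).keys.Nodup := by
    simpa [PySem.Dict.keys] using hnodup
  have hcast : ((number.toNat : Nat) : Int) = max number 0 := Int.toNat_eq_max number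
  have hpre' : (∀ l ∈ pvMatched color pvColors, (PySem.Dict.mk pool).contains l = true) ∨
      ((number.toNat : Nat) : Int) ≤ pvAvail (PySem.Dict.mk pool)
        ((pvMatched color pvColors).takeWhile (fun l => (PySem.Dict.mk pool).contains l)) := by
    rcases hpre2 with h1 | h2
    · exact Or.inl h1
    · right
      rw [hcast]
      have := pvAvail_nonneg (PySem.Dict.mk pool)
        ((pvMatched color pvColors).takeWhile (fun l => (PySem.Dict.mk pool).contains l))
      omega
  obtain ⟨hflag, hres⟩ := pvMain color pvColors (by decide) number.toNat (PySem.Dict.mk pool) hkeys hpre'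
  rw [hcast] at hflag hres
  cases hb : (pvColors.foldl (pvStepB color) (max number 0, PySem.Dict.mk pool)).1 == 0
  · rw [hb] at hflag
    simp only [hflag, if_false, Bool.false_eq_true]
  · rw [hb] at hflag
    have hr0 : (pvColors.foldl (pvStepB color) (max number 0, PySem.Dict.mk pool)).1 = 0 := by
      simpa using hb
    rw [hres hr0]
    simp only [if_true]
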